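-- pv_equiv track=rewrite | github.com/hemolack/aoc2021 | 9.py | risk_map
-- ===== SOURCE A (Python) =====
-- def risk_map(map):
--     riskmap = [[0] * len(map[0]) for _ in range(len(map))]
--     for row in range(len(map)):
--         for col in range(len(map[0])):
--             lowpoint = True
--             value = map[row][col]
--             if row - 1 >= 0:
--                 lowpoint = lowpoint and map[row - 1][col] > value
--             if col - 1 >= 0:
--                 lowpoint = lowpoint and map[row][col - 1] > value
--             if row + 1 < len(map):
--                 lowpoint = lowpoint and map[row + 1][col] > value
--             if col + 1 < len(map[0]):
--                 lowpoint = lowpoint and map[row][col + 1] > value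
--             if lowpoint:
--                 riskmap[row][col] = 1 + value
--             else:
--                 riskmap[row][col] = 0
--     return riskmap
-- ===== SOURCE B (Python) =====
-- def risk_map(map):
--     w = len(map[0])
--     g = [row[:w] for row in map]
--     n = len(g)
--     horiz = []
--     for row in g:
--         lt_left = [True] + [a > b for a, b in zip(row, row[1:])]
--         lt_right = [a > b for a, b in zip(row[1:], row)] + [True]
--         horiz.append([l and r for l, r in zip(lt_left, lt_right)])
--     vert = []
--     for r in range(n):
--         above = [a > b for a, b in zip(g[r - 1], g[r])] if r > 0 else [True] * w
--         below = [a > b for a, b in zip(g[r + 1], g[r])] if r + 1 < n else [True] * w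
--         vert.append([u and d for u, d in zip(above, below)])
--     return [[1 + v if h and vv else 0 for v, h, vv in zip(row, hr, vr)]
--             for row, hr, vr in zip(g, horiz, vert)]
-- ===== Notes on version B (the rewrite author's own statement) =====
-- stated objective: alternative
-- what changed: B replaces A's single per-cell pass with four boundary if-guards and in-place writes into a preallocated grid by three staged passes: a horizontal pass comparing each row with its shifted self via zip, a vertical pass comparing adjacent rows elementwise, and a final zip combining the two masks with the values.
-- outside the precondition, e.g. on risk_map([]): A returns [], B raises IndexError
import Mathlib
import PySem

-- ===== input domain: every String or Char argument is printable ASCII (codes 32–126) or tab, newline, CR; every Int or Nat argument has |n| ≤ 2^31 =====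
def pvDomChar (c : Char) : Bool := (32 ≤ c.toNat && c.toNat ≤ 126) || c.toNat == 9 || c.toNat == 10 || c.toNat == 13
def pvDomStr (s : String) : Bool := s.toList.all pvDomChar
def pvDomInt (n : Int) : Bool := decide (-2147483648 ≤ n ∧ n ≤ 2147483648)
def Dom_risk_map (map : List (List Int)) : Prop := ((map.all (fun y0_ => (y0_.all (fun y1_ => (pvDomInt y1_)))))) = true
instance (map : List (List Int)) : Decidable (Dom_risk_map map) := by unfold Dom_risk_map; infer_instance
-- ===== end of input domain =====

-- B replaces A's single guarded per-cell pass over a mutated preallocated grid by three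
-- staged passes (a horizontal zip-shift pass per row, a vertical pass comparing adjacent
-- rows elementwise, and a final zip combining masks and values); objective: alternative.

-- ===== PORT A =====
def risk_map (map : List (List Int)) : List (List Int) :=
  let n : Int := (map.length : Int)
  let w : Int := (((PySem.List.pyGet? map 0).getD []).length : Int)
  -- riskmap = [[0] * len(map[0]) for _ in range(len(map))]
  let riskmap : List (List Int) := (PySem.List.pyRange 0 n).map (fun _ => List.replicate w.toNat (0 : Int))
  (PySem.List.pyRange 0 n).foldl (fun riskmap row =>
    (PySem.List.pyRange 0 w).foldl (fun riskmap col =>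
      -- indices produced by range are in bounds when Pre_ holds, so pyGetD/pySetD are exact here
      let value := PySem.List.pyGetD (PySem.List.pyGetD map row []) col 0
      let lowpoint := true
      let lowpoint := if row - 1 ≥ 0 then lowpoint && decide (PySem.List.pyGetD (PySem.List.pyGetD map (row - 1) []) col 0 > value) else lowpoint
      let lowpoint := if col - 1 ≥ 0 then lowpoint && decide (PySem.List.pyGetD (PySem.List.pyGetD map row []) (col - 1) 0 > value) else lowpoint
      let lowpoint := if row + 1 < n then lowpoint && decide (PySem.List.pyGetD (PySem.List.pyGetD map (row + 1) []) col 0 > value) else lowpoint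
      let lowpoint := if col + 1 < w then lowpoint && decide (PySem.List.pyGetD (PySem.List.pyGetD map row []) (col + 1) 0 > value) else lowpoint
      -- riskmap[row][col] = 1 + value / 0
      PySem.List.pySetD riskmap row (PySem.List.pySetD (PySem.List.pyGetD riskmap row []) col (if lowpoint then 1 + value else 0))
    ) riskmap) riskmap

-- ===== PORT B =====
-- zip(xs, ys, zs): truncating 3-way zip, as Python's zip
def pvZip3 {α β γ : Type} : List α → List β → List γ → List (α × β × γ)
  | a :: as, b :: bs, c :: cs => (a, b, c) :: pvZip3 as bs cs
  | _, _, _ => []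

def risk_map_alt (map : List (List Int)) : List (List Int) :=
  let w : Int := (((PySem.List.pyGet? map 0).getD []).length : Int)
  -- g = [row[:w] for row in map]
  let g : List (List Int) := map.map (fun row => PySem.List.slice row none (some w))
  let n : Int := (g.length : Int)
  -- horizontal pass: each row compared with its shifted self
  let horiz : List (List Bool) := g.map (fun row =>
    let lt_left : List Bool := [true] ++ List.zipWith (fun a b => decide (a > b)) row (PySem.List.slice row (some 1) none)
    let lt_right : List Bool := List.zipWith (fun a b => decide (a > b)) (PySem.List.slice row (some 1) none) row ++ [true]
    List.zipWith (fun l r => l && r) lt_left lt_right)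
  -- vertical pass: adjacent rows compared elementwise
  let vert : List (List Bool) := (PySem.List.pyRange 0 n).map (fun r =>
    let above : List Bool := if r > 0 then List.zipWith (fun a b => decide (a > b)) (PySem.List.pyGetD g (r - 1) []) (PySem.List.pyGetD g r []) else List.replicate w.toNat true
    let below : List Bool := if r + 1 < n then List.zipWith (fun a b => decide (a > b)) (PySem.List.pyGetD g (r + 1) []) (PySem.List.pyGetD g r []) else List.replicate w.toNat true
    List.zipWith (fun u d => u && d) above below)
  (pvZip3 g horiz vert).map (fun t =>
    (pvZip3 t.1 t.2.1 t.2.2).map (fun s => if s.2.1 && s.2.2 then 1 + s.1 else 0))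

-- ===== PRECONDITION & SPEC =====
-- Pre_ excludes grids with a row shorter than row 0, on which A raises IndexError
-- (map[row][col] for col < len(map[0])), and the empty grid, where A happens to return []
-- without ever evaluating map[0] while B's up-front len(map[0]) raises IndexError.
def Pre_risk_map (map : List (List Int)) : Prop :=
  map ≠ [] ∧ ∀ row ∈ map, ((PySem.List.pyGet? map 0).getD []).length ≤ row.length
instance (map : List (List Int)) : Decidable (Pre_risk_map map) := by unfold Pre_risk_map; infer_instance
def pvWitness_risk_map : List (List Int) := [[2, 1], [3, 4]]
def Spec_risk_map (map : List (List Int)) (out : List (List Int)) : Prop := out = risk_map_alt map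
instance (map : List (List Int)) (out : List (List Int)) : Decidable (Spec_risk_map map out) := by unfold Spec_risk_map; infer_instance

-- ===== CLAIM (what is proved, stated in full; the proofs are below) =====
def Claim_equal_risk_map : Prop := ∀ (map : List (List Int)), Dom_risk_map map → Pre_risk_map map → Spec_risk_map map (risk_map map)

-- ===== LEMMAS AND PROOFS =====

-- width of row 0, as both ports compute it
def pvW (m : List (List Int)) : Nat := ((PySem.List.pyGet? m 0).getD []).length

lemma pv_if_and (P : Prop) [inst : Decidable P] (x d : Bool) :
    (if P then x && d else x) = (x && (if P then d else true)) := by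
  split_ifs
  · rfl
  · exact (Bool.and_true x).symm

-- A's per-cell value (exactly the value A writes into riskmap[row][col])
def pvCellA (m : List (List Int)) (row col : Nat) : Int :=
  let n : Int := (m.length : Int)
  let w : Int := ((pvW m : Nat) : Int)
  let value := PySem.List.pyGetD (PySem.List.pyGetD m (row : Int) []) (col : Int) 0
  let lowpoint := true
  let lowpoint := if (row : Int) - 1 >= 0 then lowpoint && decide (PySem.List.pyGetD (PySem.List.pyGetD m ((row : Int) - 1) []) (col : Int) 0 > value) else lowpoint
  let lowpoint := if (col : Int) - 1 >= 0 then lowpoint && decide (PySem.List.pyGetD (PySem.List.pyGetD m (row : Int) []) ((col : Int) - 1) 0 > value) else lowpoint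
  let lowpoint := if (row : Int) + 1 < n then lowpoint && decide (PySem.List.pyGetD (PySem.List.pyGetD m ((row : Int) + 1) []) (col : Int) 0 > value) else lowpoint
  let lowpoint := if (col : Int) + 1 < w then lowpoint && decide (PySem.List.pyGetD (PySem.List.pyGetD m (row : Int) []) ((col : Int) + 1) 0 > value) else lowpoint
  if lowpoint then 1 + value else 0

-- writing each cell of a row once, left to right
lemma pv_foldl_set (g : Nat -> Int) : forall (k : Nat) (l : List Int), k <= l.length ->
    (List.range k).foldl (fun l c => l.set c (g c)) l = (List.range k).map g ++ l.drop k := by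
  intro k
  induction k with
  | zero => intro l _; simp
  | succ k ih =>
    intro l hk
    simp only [List.range_succ, List.foldl_append, List.foldl_cons, List.foldl_nil]
    rw [ih l (by omega)]
    have hlt : k < l.length := by omega
    rw [List.set_append_right _ _ (by simp)]
    simp only [List.length_map, List.length_range, Nat.sub_self]
    rw [List.drop_eq_getElem_cons hlt, List.set_cons_zero]
    simp

-- the inner column loop only rewrites row `row` of the grid
lemma pv_rowfold (g : Nat -> Int) (row w : Nat) (rm : List (List Int)) (hrow : row < rm.length) :
    (List.range w).foldl (fun rm c => rm.set row ((rm.getD row []).set c (g c))) rm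
      = rm.set row ((List.range w).foldl (fun l c => l.set c (g c)) (rm.getD row [])) := by
  induction w with
  | zero =>
    simp only [List.range_zero, List.foldl_nil]
    rw [List.getD_eq_getElem _ _ hrow, List.set_getElem_self]
  | succ w ih =>
    simp only [List.range_succ, List.foldl_append, List.foldl_cons, List.foldl_nil]
    rw [ih]
    set L := (List.range w).foldl (fun l c => l.set c (g c)) (rm.getD row []) with hL
    rw [List.getD_eq_getElem _ _ (by simpa using hrow), List.getElem_set_self, List.set_set]

-- the whole double loop of A, on the zero-initialized grid
lemma pv_outer (g : Nat -> Nat -> Int) (w n : Nat) (repl : List Int) (hlen : repl.length = w) :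
    forall k, k <= n ->
    (List.range k).foldl
      (fun rm row => (List.range w).foldl
        (fun rm col => PySem.List.pySetD rm ((row : Nat) : Int)
          (PySem.List.pySetD (PySem.List.pyGetD rm ((row : Nat) : Int) []) ((col : Nat) : Int) (g row col))) rm)
      (List.replicate n repl)
    = (List.range k).map (fun r => (List.range w).map (g r)) ++ List.replicate (n - k) repl := by
  simp only [PySem.List.pySetD_natCast, PySem.List.pyGetD_natCast]
  intro k
  induction k with
  | zero => intro _; simp
  | succ k ih =>
    intro hk
    simp only [List.range_succ, List.foldl_append, List.foldl_cons, List.foldl_nil]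
    rw [ih (by omega)]
    rw [pv_rowfold (g k) k w _ (by simp; omega)]
    have hget : ((List.range k).map (fun r => (List.range w).map (g r)) ++ List.replicate (n - k) repl).getD k [] = repl := by
      rw [List.getD_append_right _ _ _ _ (by simp)]
      simp only [List.length_map, List.length_range, Nat.sub_self]
      rw [List.getD_eq_getElem _ _ (by simp; omega), List.getElem_replicate]
    rw [hget, pv_foldl_set (g k) w repl (by omega)]
    rw [show repl.drop w = [] from by rw [<- hlen]; exact List.drop_length, List.append_nil]
    rw [List.set_append_right _ _ (by simp)]
    simp only [List.length_map, List.length_range, Nat.sub_self]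
    rw [show n - k = (n - (k + 1)) + 1 from by omega, List.replicate_succ, List.set_cons_zero]
    simp

theorem A_norm (m : List (List Int)) :
    risk_map m = (List.range m.length).map (fun r => (List.range (pvW m)).map (fun c => pvCellA m r c)) := by
  have H := pv_outer (pvCellA m) (pvW m) m.length (List.replicate (pvW m) (0 : Int)) (by simp) m.length le_rfl
  simp only [Nat.sub_self, List.replicate_zero, List.append_nil] at H
  unfold risk_map
  simp only [PySem.List.pyRange_zero_nat, List.foldl_map, List.map_map, Function.comp_def,
    Int.toNat_natCast, List.map_const', List.length_range]
  exact H

-- ===== B-side normal form =====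
def pvG (m : List (List Int)) (i : Nat) : List Int := (m.getD i []).take (pvW m)

def pvHoriz (m : List (List Int)) (r : Nat) : List Bool :=
  List.zipWith (fun l r => l && r)
    ([true] ++ List.zipWith (fun a b => decide (a > b)) (pvG m r) ((pvG m r).tail))
    (List.zipWith (fun a b => decide (a > b)) ((pvG m r).tail) (pvG m r) ++ [true])

def pvVert (m : List (List Int)) (r : Nat) : List Bool :=
  List.zipWith (fun u d => u && d)
    (if 0 < r then List.zipWith (fun a b => decide (a > b)) (pvG m (r - 1)) (pvG m r) else List.replicate (pvW m) true)
    (if r + 1 < m.length then List.zipWith (fun a b => decide (a > b)) (pvG m (r + 1)) (pvG m r) else List.replicate (pvW m) true)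

def pvCellB (m : List (List Int)) (r c : Nat) : Int :=
  if (pvHoriz m r).getD c true && (pvVert m r).getD c true then 1 + (pvG m r).getD c 0 else 0

lemma getD_map' {A B : Type} (f : A -> B) (l : List A) (i : Nat) (hi : i < l.length) (d : B) (d' : A) :
    (l.map f).getD i d = f (l.getD i d') := by
  rw [List.getD_eq_getElem _ _ (by simpa using hi), List.getElem_map, List.getD_eq_getElem _ _ hi]

lemma pvZip3_eq {A B C : Type} (d1 : A) (d2 : B) (d3 : C) :
    forall (l1 : List A) (l2 : List B) (l3 : List C), l1.length <= l2.length -> l1.length <= l3.length ->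
    pvZip3 l1 l2 l3 = (List.range l1.length).map (fun i => (l1.getD i d1, l2.getD i d2, l3.getD i d3)) := by
  intro l1
  induction l1 with
  | nil => intro l2 l3 _ _; simp [pvZip3]
  | cons a as ih =>
    intro l2 l3 h2 h3
    match l2, l3 with
    | b :: bs, c :: cs =>
      show (a, b, c) :: pvZip3 as bs cs = _
      rw [ih bs cs (by simpa using h2) (by simpa using h3)]
      simp [List.range_succ_eq_map, List.map_map, Function.comp_def]

lemma pvG_len (m : List (List Int)) (h2 : forall row, row ∈ m -> pvW m <= row.length)
    (i : Nat) (hi : i < m.length) : (pvG m i).length = pvW m := by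
  have hmem : m.getD i [] ∈ m := by rw [List.getD_eq_getElem _ _ hi]; exact List.getElem_mem _
  unfold pvG
  rw [List.length_take]
  exact min_eq_left (h2 _ hmem)

lemma pvHoriz_len (m : List (List Int)) (h2 : forall row, row ∈ m -> pvW m <= row.length)
    (i : Nat) (hi : i < m.length) : pvW m <= (pvHoriz m i).length := by
  unfold pvHoriz
  simp only [List.length_zipWith, List.length_append, List.length_cons, List.length_tail,
    pvG_len m h2 i hi]
  omega

lemma pvVert_len (m : List (List Int)) (h2 : forall row, row ∈ m -> pvW m <= row.length)
    (i : Nat) (hi : i < m.length) : (pvVert m i).length = pvW m := by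
  have ha : forall (j : Nat), j < m.length ->
      (List.zipWith (fun a b => decide (a > b)) (pvG m j) (pvG m i)).length = pvW m := by
    intro j hj
    rw [List.length_zipWith, pvG_len m h2 j hj, pvG_len m h2 i hi, min_self]
  unfold pvVert
  rw [List.length_zipWith]
  split_ifs with hx hy hy
  · rw [ha (i - 1) (by omega), ha (i + 1) (by omega), min_self]
  · rw [ha (i - 1) (by omega), List.length_replicate, min_self]
  · rw [ha (i + 1) (by omega), List.length_replicate, min_self]
  · rw [List.length_replicate, min_self]

theorem B_norm (m : List (List Int)) (h2 : forall row, row ∈ m -> pvW m <= row.length) :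
    risk_map_alt m = (List.range m.length).map (fun r => (List.range (pvW m)).map (fun c => pvCellB m r c)) := by
  have hW : ((PySem.List.pyGet? m 0).getD []).length = pvW m := rfl
  unfold risk_map_alt
  simp only [PySem.List.slice_to_natCast, PySem.List.slice_from_one, List.length_map,
    PySem.List.pyRange_zero_nat, List.map_map, Function.comp_def, Int.toNat_natCast, hW]
  rw [pvZip3_eq [] [] [] _ _ _ (by simp) (by simp)]
  simp only [List.length_map, List.map_map]
  apply List.map_congr_left
  intro i hi
  have hi' : i < m.length := List.mem_range.mp hi
  simp only [Function.comp_def]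
  rw [getD_map' (fun row => List.take (pvW m) row) m i hi' [] []]
  rw [getD_map' (fun x =>
        List.zipWith (fun l r => l && r)
          ([true] ++ List.zipWith (fun a b => decide (a > b)) (List.take (pvW m) x) (List.take (pvW m) x).tail)
          (List.zipWith (fun a b => decide (a > b)) (List.take (pvW m) x).tail (List.take (pvW m) x) ++ [true]))
        m i hi' [] []]
  rw [getD_map' _ (List.range m.length) i (by simpa using hi') [] 0]
  have hri : (List.range m.length).getD i 0 = i := by
    rw [List.getD_eq_getElem _ _ (by simpa using hi'), List.getElem_range]
  rw [hri]
  have hmid : PySem.List.pyGetD (List.map (fun row => List.take (pvW m) row) m) (i : Int) [] = pvG m i := by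
    rw [PySem.List.pyGetD_natCast]; exact getD_map' _ _ _ hi' _ []
  have hv : List.zipWith (fun u d => u && d)
      (if (i : Int) > 0 then
        List.zipWith (fun a b => decide (a > b))
          (PySem.List.pyGetD (List.map (fun row => List.take (pvW m) row) m) ((i : Int) - 1) [])
          (PySem.List.pyGetD (List.map (fun row => List.take (pvW m) row) m) (i : Int) [])
      else List.replicate (pvW m) true)
      (if (i : Int) + 1 < (m.length : Int) then
        List.zipWith (fun a b => decide (a > b))
          (PySem.List.pyGetD (List.map (fun row => List.take (pvW m) row) m) ((i : Int) + 1) [])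
          (PySem.List.pyGetD (List.map (fun row => List.take (pvW m) row) m) (i : Int) [])
      else List.replicate (pvW m) true) = pvVert m i := by
    unfold pvVert
    congr 1
    · by_cases h0 : 0 < i
      · rw [if_pos (by omega : (i : Int) > 0), if_pos h0,
            show (i : Int) - 1 = ((i - 1 : Nat) : Int) from by omega,
            PySem.List.pyGetD_natCast, hmid, getD_map' _ _ _ (by omega) _ ([] : List Int)]
        rfl
      · rw [if_neg (by omega : ¬ ((i : Int) > 0)), if_neg h0]
    · by_cases h1 : i + 1 < m.length
      · rw [if_pos (by omega : (i : Int) + 1 < (m.length : Int)), if_pos h1,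
            show (i : Int) + 1 = ((i + 1 : Nat) : Int) from by omega,
            PySem.List.pyGetD_natCast, hmid, getD_map' _ _ _ (by omega) _ ([] : List Int)]
        rfl
      · rw [if_neg (by omega : ¬ ((i : Int) + 1 < (m.length : Int))), if_neg h1]
  rw [hv]
  show List.map _ (pvZip3 (pvG m i) (pvHoriz m i) (pvVert m i)) = _
  rw [pvZip3_eq 0 true true _ _ _
        (by rw [pvG_len m h2 i hi']; exact pvHoriz_len m h2 i hi')
        (by rw [pvG_len m h2 i hi', pvVert_len m h2 i hi'])]
  rw [pvG_len m h2 i hi', List.map_map]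
  rfl

theorem cell_eq (m : List (List Int)) (h2 : forall row, row ∈ m -> pvW m <= row.length)
    (r c : Nat) (hr : r < m.length) (hc : c < pvW m) : pvCellA m r c = pvCellB m r c := by
  have hlen : (pvG m r).length = pvW m := pvG_len m h2 r hr
  have hget : forall (j : Nat), j < m.length -> forall (k : Nat) (h : k < (pvG m j).length),
      (pvG m j)[k] = (m.getD j []).getD k 0 := by
    intro j hj k h
    have hjlen : (pvG m j).length = pvW m := pvG_len m h2 j hj
    have hjrow : pvW m <= (m.getD j []).length := by
      have hmem : m.getD j [] ∈ m := by rw [List.getD_eq_getElem _ _ hj]; exact List.getElem_mem _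
      exact h2 _ hmem
    unfold pvG at h ⊢
    rw [List.getElem_take]
    exact (List.getD_eq_getElem _ _ (by rw [List.length_take] at h; omega)).symm
  have hH : (pvHoriz m r).getD c true =
      ((if (c : Int) - 1 >= 0 then decide ((m.getD r []).getD (c - 1) 0 > (m.getD r []).getD c 0) else true) &&
       (if (c : Int) + 1 < ((pvW m : Nat) : Int) then decide ((m.getD r []).getD (c + 1) 0 > (m.getD r []).getD c 0) else true)) := by
    rw [List.getD_eq_getElem _ _ (lt_of_lt_of_le hc (pvHoriz_len m h2 r hr))]
    unfold pvHoriz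
    rw [List.getElem_zipWith]
    congr 1
    · simp only [List.singleton_append]
      by_cases hc0 : 0 < c
      · rw [if_pos (show (c : Int) - 1 >= 0 by omega)]
        obtain ⟨k, rfl⟩ : ∃ k, c = k + 1 := ⟨c - 1, by omega⟩
        simp only [List.getElem_cons_succ, List.getElem_zipWith, List.getElem_tail]
        simp only [hget r hr]
        simp
      · rw [if_neg (show ¬ ((c : Int) - 1 >= 0) by omega)]
        obtain rfl : c = 0 := by omega
        simp only [List.getElem_cons_zero]
    · simp only [List.getElem_append]
      by_cases hcw : c + 1 < pvW m
      · rw [if_pos (show (c : Int) + 1 < ((pvW m : Nat) : Int) by omega), dif_pos (by rw [List.length_zipWith, List.length_tail, hlen]; omega)]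
        simp only [List.getElem_zipWith, List.getElem_tail]
        simp only [hget r hr]
      · rw [if_neg (show ¬ ((c : Int) + 1 < ((pvW m : Nat) : Int)) by omega), dif_neg (by rw [List.length_zipWith, List.length_tail, hlen]; omega)]
        simp only [List.getElem_singleton]
  have hV : (pvVert m r).getD c true =
      ((if (r : Int) - 1 >= 0 then decide ((m.getD (r - 1) []).getD c 0 > (m.getD r []).getD c 0) else true) &&
       (if (r : Int) + 1 < (m.length : Int) then decide ((m.getD (r + 1) []).getD c 0 > (m.getD r []).getD c 0) else true)) := by
    rw [List.getD_eq_getElem _ _ (by rw [pvVert_len m h2 r hr]; exact hc)]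
    unfold pvVert
    rw [List.getElem_zipWith]
    congr 1
    · by_cases h0 : 0 < r
      · rw [if_pos (show (r : Int) - 1 >= 0 by omega)]
        split_ifs
        simp only [List.getElem_zipWith, hget (r - 1) (by omega), hget r hr]
      · rw [if_neg (show ¬ ((r : Int) - 1 >= 0) by omega)]
        split_ifs
        exact List.getElem_replicate ..
    · by_cases h1 : r + 1 < m.length
      · rw [if_pos (show (r : Int) + 1 < (m.length : Int) by omega)]
        split_ifs
        simp only [List.getElem_zipWith, hget (r + 1) (by omega), hget r hr]
      · rw [if_neg (show ¬ ((r : Int) + 1 < (m.length : Int)) by omega)]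
        split_ifs
        exact List.getElem_replicate ..
  have hvalrc : (pvG m r).getD c 0 = (m.getD r []).getD c 0 := by
    rw [List.getD_eq_getElem _ _ (by rw [hlen]; exact hc), hget r hr]
  unfold pvCellB
  rw [hH, hV, hvalrc]
  simp only [pvCellA]
  simp only [PySem.List.pyGetD_natCast]
  simp only [pv_if_and]
  have e1 : (if (r : Int) - 1 >= 0 then decide ((PySem.List.pyGetD m ((r : Int) - 1) []).getD c 0 > (m.getD r []).getD c 0) else true) = (if (r : Int) - 1 >= 0 then decide ((m.getD (r - 1) []).getD c 0 > (m.getD r []).getD c 0) else true) := by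
    split_ifs with h
    · rw [show ((r : Int) - 1) = (((r - 1 : Nat)) : Int) from by omega, PySem.List.pyGetD_natCast]
    · rfl
  have e2 : (if (c : Int) - 1 >= 0 then decide (PySem.List.pyGetD (m.getD r []) ((c : Int) - 1) 0 > (m.getD r []).getD c 0) else true) = (if (c : Int) - 1 >= 0 then decide ((m.getD r []).getD (c - 1) 0 > (m.getD r []).getD c 0) else true) := by
    split_ifs with h
    · rw [show ((c : Int) - 1) = (((c - 1 : Nat)) : Int) from by omega, PySem.List.pyGetD_natCast]
    · rfl
  have e3 : PySem.List.pyGetD m ((r : Int) + 1) [] = m.getD (r + 1) [] := by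
    rw [show ((r : Int) + 1) = (((r + 1 : Nat)) : Int) from by push_cast; ring, PySem.List.pyGetD_natCast]
  have e4 : PySem.List.pyGetD (m.getD r []) ((c : Int) + 1) 0 = (m.getD r []).getD (c + 1) 0 := by
    rw [show ((c : Int) + 1) = (((c + 1 : Nat)) : Int) from by push_cast; ring, PySem.List.pyGetD_natCast]
  rw [e1, e2, e3, e4]
  have hbool : forall a b c d : Bool, ((((true && a) && b) && c) && d) = ((b && d) && (a && c)) := by decide
  rw [hbool]

-- ===== VERDICT (by name: the statement is the Claim_ definition above) =====
theorem risk_map_spec : Claim_equal_risk_map := by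
  intro m _ hpre
  unfold Spec_risk_map
  rw [A_norm, B_norm m hpre.2]
  apply List.map_congr_left
  intro r hrmem
  apply List.map_congr_left
  intro c hcmem
  exact cell_eq m hpre.2 r c (List.mem_range.mp hrmem) (List.mem_range.mp hcmem)
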